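-- pv_equiv track=rewrite | github.com/Bgzdl/Multi-model-NER | utils.py | calculate_per_accuracy
-- ===== SOURCE A (Python) =====
-- def calculate_per_accuracy(gold_named_entity, pred_named_entity):
--     correct_predictions = 0
--     total_pred_entities = 0
--     total_gold_entities = 0
--
--     # 遍历预测的命名实体
--     for word, predicted_entity in pred_named_entity.items():
--         if predicted_entity == 'PER':
--             total_pred_entities += 1
--         # 检查该单词是否在真实标注中且实体类型匹配
--             if word in gold_named_entity and predicted_entity == gold_named_entity[word]:
--                 correct_predictions += 1
--     for word, gold_entity in gold_named_entity.items():
--         if gold_entity == 'PER':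
--             total_gold_entities += 1
--     return correct_predictions, total_pred_entities, total_gold_entities
-- ===== SOURCE B (Python) =====
-- def calculate_per_accuracy(gold_named_entity, pred_named_entity):
--     pred_per = sorted(w for w, e in pred_named_entity.items() if e == 'PER')
--     gold_per = sorted(w for w, e in gold_named_entity.items() if e == 'PER')
--     correct = 0
--     i = j = 0
--     while i < len(pred_per) and j < len(gold_per):
--         if pred_per[i] == gold_per[j]:
--             correct += 1
--             i += 1
--             j += 1
--         elif pred_per[i] < gold_per[j]:
--             i += 1
--         else:
--             j += 1
--     return correct, len(pred_per), len(gold_per)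
-- ===== Notes on version B (the rewrite author's own statement) =====
-- stated objective: alternative
-- what changed: Replaces A's counting loop with dict lookups by a sort-then-merge algorithm: it sorts the PER-labelled words of each dict and counts the intersection with a two-pointer merge scan, correct because dict keys are unique so each sorted list is strictly increasing.
import Mathlib
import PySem

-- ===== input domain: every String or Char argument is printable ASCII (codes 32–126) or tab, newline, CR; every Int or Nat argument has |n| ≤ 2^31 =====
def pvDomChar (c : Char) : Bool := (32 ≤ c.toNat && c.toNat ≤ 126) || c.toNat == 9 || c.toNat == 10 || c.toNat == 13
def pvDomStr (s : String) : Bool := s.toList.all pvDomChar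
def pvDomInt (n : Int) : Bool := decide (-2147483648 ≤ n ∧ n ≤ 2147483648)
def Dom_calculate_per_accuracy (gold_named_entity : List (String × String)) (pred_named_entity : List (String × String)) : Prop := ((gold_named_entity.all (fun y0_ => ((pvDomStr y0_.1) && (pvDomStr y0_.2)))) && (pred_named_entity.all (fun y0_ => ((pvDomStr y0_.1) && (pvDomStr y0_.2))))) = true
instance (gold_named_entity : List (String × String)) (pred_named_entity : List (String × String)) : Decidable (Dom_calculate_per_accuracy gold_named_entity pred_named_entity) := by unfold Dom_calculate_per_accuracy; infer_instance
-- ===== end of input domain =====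

-- B sorts each dict's PER-labelled words and counts the intersection with a
-- two-pointer merge scan instead of A's counting loop with lookups into gold (alternative).

-- ===== PORT A =====
-- one iteration of A's loop over pred_named_entity.items()
def stepA (gold_named_entity : List (String × String)) (acc : Int × Int) (wp : String × String) : Int × Int :=
  if wp.2 == "PER" then
    let acc1 : Int × Int := (acc.1, acc.2 + 1)
    if ((PySem.Dict.mk gold_named_entity).contains wp.1 &&
        ((PySem.Dict.mk gold_named_entity).get? wp.1 == some wp.2)) then
      (acc1.1 + 1, acc1.2)
    else acc1
  else acc

def calculate_per_accuracy (gold_named_entity : List (String × String)) (pred_named_entity : List (String × String)) : Int × Int × Int :=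
  let st := pred_named_entity.foldl (stepA gold_named_entity) (0, 0)
  let total_gold := gold_named_entity.foldl
    (fun (acc : Int) we => if we.2 == "PER" then acc + 1 else acc) 0
  (st.1, st.2, total_gold)

-- ===== PORT B =====
-- B's while-loop over the two sorted lists with indices i, j, transcribed as the
-- structural two-list recursion (advancing an index = dropping the head)
def mergeCountB : List String → List String → Int
  | [], _ => 0
  | _ :: _, [] => 0
  | x :: xs, y :: ys =>
    if x == y then 1 + mergeCountB xs ys
    else if x < y then mergeCountB xs (y :: ys)
    else mergeCountB (x :: xs) ys
termination_by a b => a.length + b.length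

def calculate_per_accuracy_alt (gold_named_entity : List (String × String)) (pred_named_entity : List (String × String)) : Int × Int × Int :=
  let pred_per := PySem.List.sorted ((pred_named_entity.filter (fun wp => wp.2 == "PER")).map (·.1)) (fun x => x) false
  let gold_per := PySem.List.sorted ((gold_named_entity.filter (fun wp => wp.2 == "PER")).map (·.1)) (fun x => x) false
  (mergeCountB pred_per gold_per, (pred_per.length : Int), (gold_per.length : Int))

-- ===== PRECONDITION & SPEC =====
-- Pre_ requires each association list to have pairwise-distinct keys: the Python arguments
-- are dicts, which cannot hold duplicate keys, so no input the Python A accepts is excluded.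
def Pre_calculate_per_accuracy (gold_named_entity : List (String × String)) (pred_named_entity : List (String × String)) : Prop :=
  (gold_named_entity.map Prod.fst).Nodup ∧ (pred_named_entity.map Prod.fst).Nodup

instance (gold_named_entity : List (String × String)) (pred_named_entity : List (String × String)) : Decidable (Pre_calculate_per_accuracy gold_named_entity pred_named_entity) := by unfold Pre_calculate_per_accuracy; infer_instance

def pvWitness_calculate_per_accuracy : (List (String × String)) × (List (String × String)) :=
  ([("alice", "PER"), ("paris", "LOC")], [("alice", "PER"), ("bob", "PER")])

def Spec_calculate_per_accuracy (gold_named_entity : List (String × String)) (pred_named_entity : List (String × String)) (out : Int × Int × Int) : Prop := out = calculate_per_accuracy_alt gold_named_entity pred_named_entity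
instance (gold_named_entity : List (String × String)) (pred_named_entity : List (String × String)) (out : Int × Int × Int) : Decidable (Spec_calculate_per_accuracy gold_named_entity pred_named_entity out) := by unfold Spec_calculate_per_accuracy; infer_instance

-- ===== CLAIM (what is proved, stated in full; the proofs are below) =====
def Claim_equal_calculate_per_accuracy : Prop := ∀ (gold_named_entity : List (String × String)) (pred_named_entity : List (String × String)), Dom_calculate_per_accuracy gold_named_entity pred_named_entity → Pre_calculate_per_accuracy gold_named_entity pred_named_entity → Spec_calculate_per_accuracy gold_named_entity pred_named_entity (calculate_per_accuracy gold_named_entity pred_named_entity)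

-- ===== LEMMAS AND PROOFS =====

-- the membership-then-lookup test of A equals a single first-match lookup test
theorem stepA_test_eq (g : List (String × String)) (w v : String) :
    ((PySem.Dict.mk g).contains w && ((PySem.Dict.mk g).get? w == some v))
      = ((PySem.Dict.mk g).get? w == some v) := by
  rw [PySem.Dict.contains_eq_isSome_get? (PySem.Dict.mk g) w]
  cases h : (PySem.Dict.mk g).get? w
  · simp
  · simp

-- A's loop over pred accumulates two filter-lengths
theorem loopA (g : List (String × String)) (p : List (String × String)) (c t : Int) :
    p.foldl (stepA g) (c, t)
      = (c + ((p.filter (fun wp => wp.2 == "PER" && ((PySem.Dict.mk g).get? wp.1 == some "PER"))).length : Int),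
         t + ((p.filter (fun wp => wp.2 == "PER")).length : Int)) := by
  induction p generalizing c t with
  | nil => simp
  | cons wp rest ih =>
    simp only [List.foldl_cons, List.filter_cons]
    rw [stepA]
    by_cases h : wp.2 = "PER"
    · rw [if_pos (by simp [h]), stepA_test_eq]
      by_cases h2 : (PySem.Dict.mk g).get? wp.1 = some "PER"
      · rw [if_pos (by simp [h, h2])]
        rw [ih]
        simp [h, h2]
        constructor <;> ring
      · rw [if_neg (by simp [h, h2])]
        rw [ih]
        simp [h, h2]
        ring
    · rw [if_neg (by simp [h])]
      rw [ih]
      simp [h]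

-- A's loop over gold accumulates a filter-length
theorem loopG (g : List (String × String)) (t : Int) :
    g.foldl (fun (acc : Int) we => if we.2 == "PER" then acc + 1 else acc) t
      = t + ((g.filter (fun we => we.2 == "PER")).length : Int) := by
  induction g generalizing t with
  | nil => simp
  | cons we rest ih =>
    simp only [List.foldl_cons, List.filter_cons]
    by_cases h : we.2 = "PER"
    · rw [if_pos (by simp [h]), ih]
      simp [h]
      ring
    · rw [if_neg (by simp [h]), ih]
      simp [h]

-- the PER-words of a nodup-keyed list are nodup
theorem nodup_per_words (l : List (String × String)) (h : (l.map Prod.fst).Nodup) :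
    ((l.filter (fun wp => wp.2 == "PER")).map (·.1)).Nodup := by
  have hs : (l.filter (fun wp => wp.2 == "PER")).Sublist l := List.filter_sublist
  exact h.sublist (hs.map Prod.fst)

-- under nodup gold keys, first-match lookup of "PER" is membership of (w, "PER")
theorem get?_eq_some_per (g : List (String × String)) (hg : (g.map Prod.fst).Nodup) (w : String) :
    ((PySem.Dict.mk g).get? w = some "PER") ↔ (w, "PER") ∈ g := by
  rw [PySem.Dict.get?_eq_some_iff_mem_items (PySem.Dict.mk g) w "PER" (by simpa [PySem.Dict.keys] using hg)]

-- membership of a word in the gold PER-word list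
theorem mem_gold_per (g : List (String × String)) (w : String) :
    w ∈ (g.filter (fun wp => wp.2 == "PER")).map (·.1) ↔ (w, "PER") ∈ g := by
  rw [List.mem_map]
  constructor
  · rintro ⟨⟨a, b⟩, hab, rfl⟩
    simp only [List.mem_filter] at hab
    have : b = "PER" := by simpa using hab.2
    subst this; exact hab.1
  · intro h
    exact ⟨(w, "PER"), by simp [List.mem_filter, h], rfl⟩

-- the merge scan on strictly increasing lists counts a's members of b
theorem mergeCountB_eq (a b : List String)
    (ha : a.Pairwise (· < ·)) (hb : b.Pairwise (· < ·)) :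
    mergeCountB a b = ((a.filter (fun x => decide (x ∈ b))).length : Int) := by
  induction a generalizing b with
  | nil => simp [mergeCountB]
  | cons x xs ih =>
    induction b with
    | nil => simp [mergeCountB]
    | cons y ys ihb =>
      rw [mergeCountB]
      rcases List.pairwise_cons.mp ha with ⟨hxa, ha'⟩
      rcases List.pairwise_cons.mp hb with ⟨hyb, hb'⟩
      by_cases hxy : x = y
      · subst hxy
        rw [if_pos (by simp)]
        have hxs : xs.filter (fun z => decide (z ∈ x :: ys)) = xs.filter (fun z => decide (z ∈ ys)) := by
          apply List.filter_congr
          intro z hz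
          have hne : z ≠ x := fun he => absurd (hxa z hz) (by simp [he])
          simp [List.mem_cons, hne]
        rw [List.filter_cons_of_pos (by simp), ih ys ha' hb', hxs]
        simp only [List.length_cons]
        push_cast
        ring
      · rw [if_neg (by simp [hxy])]
        by_cases hlt : x < y
        · rw [if_pos hlt]
          have hx : x ∉ y :: ys := by
            intro hmem
            rcases List.mem_cons.mp hmem with he | hm
            · exact hxy he
            · exact absurd (hyb x hm) (not_lt.mpr (le_of_lt hlt))
          rw [List.filter_cons_of_neg (by simp [hx]), ih (y :: ys) ha' hb]
        · rw [if_neg hlt]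
          have hyx : y < x := lt_of_le_of_ne (not_lt.mp hlt) (Ne.symm hxy)
          have hfc : (x :: xs).filter (fun z => decide (z ∈ y :: ys))
              = (x :: xs).filter (fun z => decide (z ∈ ys)) := by
            apply List.filter_congr
            intro z hz
            have hne : z ≠ y := by
              rcases List.mem_cons.mp hz with he | hm
              · exact fun he2 => absurd hyx (by simp [← he2, he])
              · intro he2
                exact absurd (lt_trans hyx (hxa z hm)) (by simp [he2])
            simp [List.mem_cons, hne]
          rw [ihb hb', hfc]

-- sorted of a nodup list is strictly increasing
theorem sorted_strict (l : List String) (h : l.Nodup) :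
    (PySem.List.sorted l (fun x => x) false).Pairwise (· < ·) := by
  have hle := PySem.List.sorted_pairwise l (fun x => x)
  have hnd : (PySem.List.sorted l (fun x => x) false).Nodup :=
    (PySem.List.sorted_perm l (fun x => x) false).nodup_iff.mpr h
  exact List.Pairwise.imp₂ (fun a b h1 h2 => lt_of_le_of_ne h1 h2) hle hnd

theorem calculate_per_accuracy_spec_aux (g p : List (String × String))
    (hg : (g.map Prod.fst).Nodup) (hp : (p.map Prod.fst).Nodup) :
    calculate_per_accuracy g p = calculate_per_accuracy_alt g p := by
  unfold calculate_per_accuracy calculate_per_accuracy_alt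
  simp only [loopA, loopG, zero_add]
  have hPs := sorted_strict ((p.filter (fun wp => wp.2 == "PER")).map (·.1)) (nodup_per_words p hp)
  have hGs := sorted_strict ((g.filter (fun wp => wp.2 == "PER")).map (·.1)) (nodup_per_words g hg)
  refine Prod.ext ?_ (Prod.ext ?_ ?_)
  · -- merge count = correct_predictions
    show _ = mergeCountB _ _
    rw [mergeCountB_eq _ _ hPs hGs]
    -- membership in the sorted gold list is membership in the gold PER-word list
    have h1 : ∀ q : String → Bool,
        ((PySem.List.sorted ((p.filter (fun wp => wp.2 == "PER")).map (·.1)) (fun x => x) false).filter q).length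
          = (((p.filter (fun wp => wp.2 == "PER")).map (·.1)).filter q).length :=
      fun q => List.Perm.length_eq ((PySem.List.sorted_perm _ (fun x => x) false).filter q)
    rw [List.filter_congr (l := PySem.List.sorted _ _ false)
          (q := fun x => decide (x ∈ (g.filter (fun wp => wp.2 == "PER")).map (·.1)))
          (fun w _ => by simp [PySem.List.mem_sorted]),
        h1, List.filter_congr (q := fun x => ((PySem.Dict.mk g).get? x == some "PER"))
          (fun w _ => by
            rw [Bool.eq_iff_iff]
            simp [mem_gold_per g w, get?_eq_some_per g hg w]),
        List.filter_map, List.length_map, List.filter_filter]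
    have h2 : (fun a : String × String =>
          ((fun x => ((PySem.Dict.mk g).get? x == some "PER")) ∘ fun x : String × String => x.1) a && a.2 == "PER")
        = (fun wp : String × String => wp.2 == "PER" && ((PySem.Dict.mk g).get? wp.1 == some "PER")) := by
      funext wp
      simp [Bool.and_comm]
    rw [h2]
  · simp [PySem.List.length_sorted]
  · simp [PySem.List.length_sorted]

-- ===== VERDICT (by name: the statement is the Claim_ definition above) =====
theorem calculate_per_accuracy_spec : Claim_equal_calculate_per_accuracy := by
  intro g p _ hpre
  exact calculate_per_accuracy_spec_aux g p hpre.1 hpre.2
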